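-- pv_equiv track=rewrite | github.com/rcdodds/AdventOfCode | 2023/01/AoC_2023_01.py | solve_part_b
-- ===== SOURCE A (Python) =====
-- DIGIT_WORDS = ['one', 'two', 'three', 'four', 'five', 'six', 'seven', 'eight', 'nine']
--
-- def solve_part_b(part_b_input):
--     calibration_sum = 0
--     for row in part_b_input.split('\n'):
--         # Find first term
--         search_terms = DIGIT_WORDS + [str(x + 1) for x in range(9)]
--         search_results = [None if row.find(st) == -1 else row.find(st) for st in search_terms]
--         first_term = search_terms[search_results.index(min(filter(lambda sr: sr is not None, search_results)))]
--         tens_digit = int(first_term) if '0123456789'.find(first_term) >= 0 else DIGIT_WORDS.index(first_term) + 1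
--
--         # Find last term
--         rvs_row = row[::-1]
--         rvs_search_terms = [s[::-1] for s in search_terms]
--         rvs_search_results = [None if rvs_row.find(st) == -1 else rvs_row.find(st) for st in rvs_search_terms]
--         last_term = search_terms[rvs_search_results.index(min(filter(lambda sr: sr is not None, rvs_search_results)))]
--         ones_digit = int(last_term) if '0123456789'.find(last_term) >= 0 else DIGIT_WORDS.index(last_term) + 1
--
--         # Score
--         calibration_sum += tens_digit * 10 + ones_digit
--     return calibration_sum
-- ===== SOURCE B (Python) =====
-- DIGIT_WORDS = ['one', 'two', 'three', 'four', 'five', 'six', 'seven', 'eight', 'nine']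
--
-- def solve_part_b(part_b_input):
--     total = 0
--     for row in part_b_input.split('\n'):
--         vals = []
--         for i, ch in enumerate(row):
--             if '1' <= ch <= '9':
--                 vals.append(int(ch))
--             else:
--                 for idx, word in enumerate(DIGIT_WORDS):
--                     if row.startswith(word, i):
--                         vals.append(idx + 1)
--         total += vals[0] * 10 + vals[-1]
--     return total
-- ===== Notes on version B (the rewrite author's own statement) =====
-- stated objective: simpler
-- what changed: Replaces the 18 find()-and-min passes plus the reversed-string duplication by a single left-to-right positional scan per line that collects digit/word values in order and takes the first and last.
import Mathlib
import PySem

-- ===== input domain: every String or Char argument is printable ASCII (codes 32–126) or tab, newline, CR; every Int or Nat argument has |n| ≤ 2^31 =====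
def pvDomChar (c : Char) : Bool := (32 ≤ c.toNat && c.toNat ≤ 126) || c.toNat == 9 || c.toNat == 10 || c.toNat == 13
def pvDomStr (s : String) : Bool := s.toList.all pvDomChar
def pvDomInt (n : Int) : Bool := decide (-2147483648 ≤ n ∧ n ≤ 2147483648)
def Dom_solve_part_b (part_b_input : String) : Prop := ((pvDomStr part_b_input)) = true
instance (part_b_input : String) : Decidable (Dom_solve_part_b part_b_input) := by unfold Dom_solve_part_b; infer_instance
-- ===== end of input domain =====

-- B replaces A's 18 find()-and-min passes (and the reversed-string pass for the last digit)
-- by one positional left-to-right scan per line; equal return value on Pre_ (lines that contain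
-- a digit 1-9 or a digit word; elsewhere A raises ValueError and B raises IndexError).

-- ===== PORT A =====
def pvDigitWords : List String := ["one", "two", "three", "four", "five", "six", "seven", "eight", "nine"]

-- A's per-term scoring: int(term) if it is a digit else DIGIT_WORDS.index(term)+1
def pvTermDigit (term : String) : Int :=
  if 0 ≤ PySem.Str.find "0123456789" term then (PySem.Int.ofStr? term).getD 0
  else ((PySem.List.index? pvDigitWords term).getD 0 : Int) + 1

-- one iteration of A's row loop
def pvRowA (row : String) : Int :=
  let search_terms := pvDigitWords ++ (PySem.List.pyRange 0 9 1).map (fun x => PySem.Int.toStr (x + 1))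
  let search_results := search_terms.map
    (fun st => if PySem.Str.find row st = -1 then (none : Option Int) else some (PySem.Str.find row st))
  let tens_digit :=
    match PySem.List.min? (search_results.filterMap id) (fun x => x) with
    | none => 0   -- Python: ValueError (min of empty sequence); excluded by Pre_
    | some m =>
        let first_term := (search_terms[(PySem.List.index? search_results (some m)).getD 0]?).getD ""
        pvTermDigit first_term
  let rvs_row := (PySem.Str.slice? row none none (-1)).getD ""
  let rvs_search_terms := search_terms.map (fun s => (PySem.Str.slice? s none none (-1)).getD "")
  let rvs_search_results := rvs_search_terms.map
    (fun st => if PySem.Str.find rvs_row st = -1 then (none : Option Int) else some (PySem.Str.find rvs_row st))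
  let ones_digit :=
    match PySem.List.min? (rvs_search_results.filterMap id) (fun x => x) with
    | none => 0   -- Python: ValueError; excluded by Pre_
    | some m =>
        let last_term := (search_terms[(PySem.List.index? rvs_search_results (some m)).getD 0]?).getD ""
        pvTermDigit last_term
  tens_digit * 10 + ones_digit

def solve_part_b (part_b_input : String) : Int :=
  ((PySem.Str.split? part_b_input "\n").getD []).foldl (fun acc row => acc + pvRowA row) 0

-- ===== PORT B =====
def pvWordVals : List (List Char × Int) :=
  [(['o','n','e'], 1), (['t','w','o'], 2), (['t','h','r','e','e'], 3), (['f','o','u','r'], 4),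
   (['f','i','v','e'], 5), (['s','i','x'], 6), (['s','e','v','e','n'], 7),
   (['e','i','g','h','t'], 8), (['n','i','n','e'], 9)]

-- the values B appends while looking at position i (the suffix row[i:])
def pvPos (s : List Char) : List Int :=
  match s with
  | [] => []
  | c :: _ =>
      if '1' ≤ c ∧ c ≤ '9' then [(c.toNat : Int) - 48]
      else (pvWordVals.filter (fun wv => PySem.Chars.startswith s wv.1)).map (fun wv => wv.2)

-- B's inner loop: scan every position left to right, collecting values in order
def pvScanB : List Char → List Int
  | [] => []
  | c :: rest => pvPos (c :: rest) ++ pvScanB rest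

def pvRowB (row : String) : Int :=
  let vals := pvScanB row.toList
  (vals.head?.getD 0) * 10 + (vals.getLast?.getD 0)

def solve_part_b_alt (part_b_input : String) : Int :=
  ((PySem.Str.split? part_b_input "\n").getD []).foldl (fun acc row => acc + pvRowB row) 0

-- ===== PRECONDITION & SPEC =====
def pvAllTerms : List String :=
  ["one", "two", "three", "four", "five", "six", "seven", "eight", "nine",
   "1", "2", "3", "4", "5", "6", "7", "8", "9"]

-- Pre_ holds exactly when every line contains a digit 1-9 or a digit word; on other inputs A raises ValueError.
def Pre_solve_part_b (part_b_input : String) : Prop :=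
  (((PySem.Str.split? part_b_input "\n").getD []).all
    (fun row => pvAllTerms.any (fun t => PySem.Str.isIn t row))) = true
instance (part_b_input : String) : Decidable (Pre_solve_part_b part_b_input) := by
  unfold Pre_solve_part_b; infer_instance

def pvWitness_solve_part_b : String := "two1nine\nxtwone3four"

def Spec_solve_part_b (part_b_input : String) (out : Int) : Prop := out = solve_part_b_alt part_b_input
instance (part_b_input : String) (out : Int) : Decidable (Spec_solve_part_b part_b_input out) := by unfold Spec_solve_part_b; infer_instance

-- ===== CLAIM (what is proved, stated in full; the proofs are below) =====
def Claim_equal_solve_part_b : Prop := ∀ (part_b_input : String), Dom_solve_part_b part_b_input → Pre_solve_part_b part_b_input → Spec_solve_part_b part_b_input (solve_part_b part_b_input)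

-- ===== LEMMAS AND PROOFS =====

-- A's computed search-term list is the literal term list
theorem searchTerms_eq :
    pvDigitWords ++ (PySem.List.pyRange 0 9 1).map (fun x => PySem.Int.toStr (x + 1)) = pvAllTerms := by
  decide

theorem terms_ne_nil : ∀ t ∈ pvAllTerms, t.toList ≠ [] := by decide

-- no term is an infix of another term
theorem terms_infix : ∀ u ∈ pvAllTerms, ∀ t ∈ pvAllTerms, u.toList <:+: t.toList → u = t := by decide

theorem words_prefix : ∀ a ∈ pvWordVals, ∀ b ∈ pvWordVals, a.1 <+: b.1 → a = b := by decide

theorem words_nodup : pvWordVals.Nodup := by decide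

theorem filter_len_le_one {α : Type} (p : α → Bool) : ∀ (l : List α), l.Nodup →
    (∀ a ∈ l, ∀ b ∈ l, p a = true → p b = true → a = b) → (l.filter p).length ≤ 1 := by
  intro l
  induction l with
  | nil => intro _ _; simp
  | cons a l ih =>
      intro hnd h
      rw [List.nodup_cons] at hnd
      by_cases hpa : p a = true
      · have hfl : l.filter p = [] := by
          rw [List.filter_eq_nil_iff]
          intro b hb hpb
          exact hnd.1 ((h a (by simp) b (by simp [hb]) hpa hpb) ▸ hb)
        simp [hpa, hfl]
      · simp only [List.filter_cons, hpa]
        exact ih hnd.2 (fun x hx y hy => h x (by simp [hx]) y (by simp [hy]))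

theorem len_le_one_eq {α : Type} {l : List α} {a : α} (h1 : l.length ≤ 1) (h2 : a ∈ l) :
    l = [a] := by
  match l, h2 with
  | [x], h2 => simp_all
  | x :: y :: t, _ => simp at h1

theorem pvPos_len_le_one (s : List Char) : (pvPos s).length ≤ 1 := by
  match s with
  | [] => simp [pvPos]
  | c :: s' =>
      rw [pvPos]
      split_ifs with hd
      · simp
      · rw [List.length_map]
        apply filter_len_le_one _ _ words_nodup
        intro a ha b hb hpa hpb
        rw [PySem.Chars.startswith_iff] at hpa hpb
        rcases List.prefix_or_prefix_of_prefix hpa hpb with h | h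
        · exact words_prefix a ha b hb h
        · exact (words_prefix b hb a ha h).symm

theorem word_head_not_digit :
    ∀ wv ∈ pvWordVals, ¬('1' ≤ wv.1.headI ∧ wv.1.headI ≤ '9') := by
  decide

theorem word_ne_nil : ∀ wv ∈ pvWordVals, wv.1 ≠ [] := by decide

theorem words_filter_le_one (s : List Char) :
    (pvWordVals.filter (fun wv => PySem.Chars.startswith s wv.1)).length ≤ 1 := by
  apply filter_len_le_one _ _ words_nodup
  intro a ha b hb hpa hpb
  rw [PySem.Chars.startswith_iff] at hpa hpb
  rcases List.prefix_or_prefix_of_prefix hpa hpb with h | h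
  · exact words_prefix a ha b hb h
  · exact (words_prefix b hb a ha h).symm

theorem pos_head_digit (c : Char) (s' : List Char) (h : '1' ≤ c ∧ c ≤ '9') :
    (pvPos (c :: s')).head? = some ((c.toNat : Int) - 48) := by
  simp [pvPos, h]

theorem pos_head_word (wv : List Char × Int) (hm : wv ∈ pvWordVals) (s : List Char)
    (hp : wv.1 <+: s) : (pvPos s).head? = some wv.2 := by
  match hw : wv.1, hp with
  | c :: w', hp =>
    obtain ⟨r, hr⟩ := hp
    subst hr
    have hd : ¬('1' ≤ c ∧ c ≤ '9') := by
      have := word_head_not_digit wv hm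
      rw [hw] at this
      exact this
    rw [List.cons_append, pvPos, if_neg hd]
    have hmem : wv ∈ pvWordVals.filter (fun x => PySem.Chars.startswith (c :: (w' ++ r)) x.1) := by
      rw [List.mem_filter]
      refine ⟨hm, ?_⟩
      rw [PySem.Chars.startswith_iff, hw, ← List.cons_append]
      exact List.prefix_append _ _
    rw [len_le_one_eq (words_filter_le_one _) hmem]
    rfl
  | [], hp =>
    exact absurd hw (word_ne_nil wv hm)

-- the value B records at a position where term t matches
theorem pos_head_of_match (s : List Char) (t : String) (ht : t ∈ pvAllTerms)
    (hp : t.toList <+: s) : (pvPos s).head? = some (pvTermDigit t) := by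
  fin_cases ht
  · obtain ⟨r, hr⟩ := hp
    subst hr
    rw [show ("one".toList) = ['o','n','e'] from rfl,
      pos_head_word ((['o','n','e'], 1) : List Char × Int) (by decide) _ (List.prefix_append _ _)]
    decide
  · obtain ⟨r, hr⟩ := hp
    subst hr
    rw [show ("two".toList) = ['t','w','o'] from rfl,
      pos_head_word ((['t','w','o'], 2) : List Char × Int) (by decide) _ (List.prefix_append _ _)]
    decide
  · obtain ⟨r, hr⟩ := hp
    subst hr
    rw [show ("three".toList) = ['t','h','r','e','e'] from rfl,
      pos_head_word ((['t','h','r','e','e'], 3) : List Char × Int) (by decide) _ (List.prefix_append _ _)]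
    decide
  · obtain ⟨r, hr⟩ := hp
    subst hr
    rw [show ("four".toList) = ['f','o','u','r'] from rfl,
      pos_head_word ((['f','o','u','r'], 4) : List Char × Int) (by decide) _ (List.prefix_append _ _)]
    decide
  · obtain ⟨r, hr⟩ := hp
    subst hr
    rw [show ("five".toList) = ['f','i','v','e'] from rfl,
      pos_head_word ((['f','i','v','e'], 5) : List Char × Int) (by decide) _ (List.prefix_append _ _)]
    decide
  · obtain ⟨r, hr⟩ := hp
    subst hr
    rw [show ("six".toList) = ['s','i','x'] from rfl,
      pos_head_word ((['s','i','x'], 6) : List Char × Int) (by decide) _ (List.prefix_append _ _)]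
    decide
  · obtain ⟨r, hr⟩ := hp
    subst hr
    rw [show ("seven".toList) = ['s','e','v','e','n'] from rfl,
      pos_head_word ((['s','e','v','e','n'], 7) : List Char × Int) (by decide) _ (List.prefix_append _ _)]
    decide
  · obtain ⟨r, hr⟩ := hp
    subst hr
    rw [show ("eight".toList) = ['e','i','g','h','t'] from rfl,
      pos_head_word ((['e','i','g','h','t'], 8) : List Char × Int) (by decide) _ (List.prefix_append _ _)]
    decide
  · obtain ⟨r, hr⟩ := hp
    subst hr
    rw [show ("nine".toList) = ['n','i','n','e'] from rfl,
      pos_head_word ((['n','i','n','e'], 9) : List Char × Int) (by decide) _ (List.prefix_append _ _)]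
    decide
  · obtain ⟨r, hr⟩ := hp
    subst hr
    rw [show ("1".toList) = ['1'] from rfl, List.singleton_append,
      pos_head_digit '1' r (by decide)]
    decide
  · obtain ⟨r, hr⟩ := hp
    subst hr
    rw [show ("2".toList) = ['2'] from rfl, List.singleton_append,
      pos_head_digit '2' r (by decide)]
    decide
  · obtain ⟨r, hr⟩ := hp
    subst hr
    rw [show ("3".toList) = ['3'] from rfl, List.singleton_append,
      pos_head_digit '3' r (by decide)]
    decide
  · obtain ⟨r, hr⟩ := hp
    subst hr
    rw [show ("4".toList) = ['4'] from rfl, List.singleton_append,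
      pos_head_digit '4' r (by decide)]
    decide
  · obtain ⟨r, hr⟩ := hp
    subst hr
    rw [show ("5".toList) = ['5'] from rfl, List.singleton_append,
      pos_head_digit '5' r (by decide)]
    decide
  · obtain ⟨r, hr⟩ := hp
    subst hr
    rw [show ("6".toList) = ['6'] from rfl, List.singleton_append,
      pos_head_digit '6' r (by decide)]
    decide
  · obtain ⟨r, hr⟩ := hp
    subst hr
    rw [show ("7".toList) = ['7'] from rfl, List.singleton_append,
      pos_head_digit '7' r (by decide)]
    decide
  · obtain ⟨r, hr⟩ := hp
    subst hr
    rw [show ("8".toList) = ['8'] from rfl, List.singleton_append,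
      pos_head_digit '8' r (by decide)]
    decide
  · obtain ⟨r, hr⟩ := hp
    subst hr
    rw [show ("9".toList) = ['9'] from rfl, List.singleton_append,
      pos_head_digit '9' r (by decide)]
    decide

theorem word_of_term : ∀ wv ∈ pvWordVals, ∃ t ∈ pvAllTerms, t.toList = wv.1 := by decide

theorem digit_char_cases (c : Char) (h1 : '1' ≤ c) (h2 : c ≤ '9') :
    c = '1' ∨ c = '2' ∨ c = '3' ∨ c = '4' ∨ c = '5' ∨ c = '6' ∨ c = '7' ∨ c = '8' ∨ c = '9' := by
  have hv1 : (49 : Nat) ≤ c.toNat := h1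
  have hv2 : c.toNat ≤ 57 := h2
  have hofn := Char.ofNat_toNat c
  interval_cases h : c.toNat <;> subst hofn <;> decide

-- a nonempty pvPos means some term matches there
theorem match_of_pos_ne_nil (s : List Char) (h : pvPos s ≠ []) :
    ∃ t ∈ pvAllTerms, t.toList <+: s := by
  match s with
  | [] => exact absurd rfl h
  | c :: s' =>
      rw [pvPos] at h
      split_ifs at h with hd
      · rcases digit_char_cases c hd.1 hd.2 with h | h | h | h | h | h | h | h | h <;>
          subst h <;>
          [exact ⟨"1", by decide, ⟨s', rfl⟩⟩; exact ⟨"2", by decide, ⟨s', rfl⟩⟩;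
           exact ⟨"3", by decide, ⟨s', rfl⟩⟩; exact ⟨"4", by decide, ⟨s', rfl⟩⟩;
           exact ⟨"5", by decide, ⟨s', rfl⟩⟩; exact ⟨"6", by decide, ⟨s', rfl⟩⟩;
           exact ⟨"7", by decide, ⟨s', rfl⟩⟩; exact ⟨"8", by decide, ⟨s', rfl⟩⟩;
           exact ⟨"9", by decide, ⟨s', rfl⟩⟩]
      · have : pvWordVals.filter (fun wv => PySem.Chars.startswith (c :: s') wv.1) ≠ [] := by
          intro hnil; rw [hnil] at h; exact h rfl
        obtain ⟨wv, hmem⟩ := List.exists_mem_of_ne_nil _ this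
        rw [List.mem_filter] at hmem
        obtain ⟨t, ht, htl⟩ := word_of_term wv hmem.1
        exact ⟨t, ht, htl ▸ (PySem.Chars.startswith_iff _ _).1 hmem.2⟩

-- find points at or before any occurrence
theorem find_le_of_prefix (cs t : List Char) (j : Nat) (h : t <+: cs.drop j) :
    PySem.Chars.find cs t ≤ (j : Int) := by
  have hinf : t <:+: cs := h.isInfix.trans (List.drop_suffix j cs).isInfix
  have h0 : 0 ≤ PySem.Chars.find cs t := (PySem.Chars.find_nonneg_iff cs t).2 hinf
  rcases PySem.Chars.find_spec h0 with ⟨_, hmin⟩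
  by_contra hlt
  rw [not_le] at hlt
  exact hmin j (by omega) h

-- B's first collected value sits at the first matching position
theorem scan_head (cs : List Char) : ∀ (i : Nat), pvPos (cs.drop i) ≠ [] →
    (∀ j < i, pvPos (cs.drop j) = []) →
    (pvScanB cs).head? = (pvPos (cs.drop i)).head? := by
  induction cs with
  | nil => intro i hi _; simp [pvPos] at hi
  | cons c rest ih =>
      intro i hi hmin
      match i with
      | 0 =>
          rw [pvScanB, List.head?_append]
          simp only [List.drop_zero] at hi ⊢
          cases hh : (pvPos (c :: rest)).head? with
          | none => exact absurd (List.head?_eq_none_iff.1 hh) hi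
          | some v => simp
      | i + 1 =>
          have h0 := hmin 0 (by omega)
          simp only [List.drop_zero] at h0
          rw [pvScanB, List.head?_append, h0]
          simp only [List.drop_succ_cons] at hi ⊢
          exact ih i hi (fun j hj => hmin (j + 1) (by omega))

theorem scan_nil_of_all_nil (cs : List Char) (h : ∀ j, pvPos (cs.drop j) = []) :
    pvScanB cs = [] := by
  induction cs with
  | nil => rfl
  | cons c rest ih =>
      have h0 := h 0
      simp only [List.drop_zero] at h0
      rw [pvScanB, h0]
      simpa using ih (fun j => by simpa using h (j + 1))

-- B's last collected value sits at the last matching position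
theorem scan_last (cs : List Char) : ∀ (i : Nat), pvPos (cs.drop i) ≠ [] →
    (∀ j, i < j → pvPos (cs.drop j) = []) →
    (pvScanB cs).getLast? = (pvPos (cs.drop i)).head? := by
  induction cs with
  | nil => intro i hi _; simp [pvPos] at hi
  | cons c rest ih =>
      intro i hi hmax
      match i with
      | 0 =>
          have hrest : pvScanB rest = [] :=
            scan_nil_of_all_nil rest (fun j => by simpa using hmax (j + 1) (by omega))
          rw [pvScanB, List.getLast?_append, hrest]
          simp only [List.drop_zero] at hi ⊢
          have hone := pvPos_len_le_one (c :: rest)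
          match hl : pvPos (c :: rest), hi with
          | [v], _ => simp
          | x :: y :: t, _ => rw [hl] at hone; simp at hone
      | i + 1 =>
          rw [pvScanB, List.getLast?_append]
          simp only [List.drop_succ_cons] at hi ⊢
          rw [ih i hi (fun j hj => by simpa using hmax (j + 1) (by omega))]
          cases hh : (pvPos (List.drop i rest)).head? with
          | none => exact absurd (List.head?_eq_none_iff.1 hh) hi
          | some v => simp

-- what A's min-and-index selection yields, for any scoring function g
theorem select_spec (g : String → Int) (hg : ∀ t, -1 ≤ g t) (m : Int)
    (hmin : PySem.List.min? ((pvAllTerms.map (fun st => if g st = -1 then (none : Option Int) else some (g st))).filterMap id) (fun x => x) = some m) :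
    ∃ t ∈ pvAllTerms,
      (pvAllTerms[(PySem.List.index? (pvAllTerms.map fun st => if g st = -1 then (none : Option Int) else some (g st)) (some m)).getD 0]?).getD "" = t ∧
      g t = m ∧ (0 : Int) ≤ m ∧ (∀ u ∈ pvAllTerms, g u = -1 ∨ m ≤ g u) := by
  have hisMin := PySem.List.min?_isMin hmin
  have hmem := PySem.List.min?_mem hmin
  rw [List.mem_filterMap] at hmem
  obtain ⟨o, ho, hid⟩ := hmem
  simp only [id_eq] at hid
  have hsome : (some m) ∈ pvAllTerms.map (fun st => if g st = -1 then (none : Option Int) else some (g st)) := hid ▸ ho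
  have hidx : (PySem.List.index? (pvAllTerms.map fun st => if g st = -1 then (none : Option Int) else some (g st)) (some m)).isSome = true :=
    (PySem.List.index?_isSome_iff _ _).2 hsome
  obtain ⟨k, hk⟩ := Option.isSome_iff_exists.1 hidx
  obtain ⟨hklt, hkeq, -⟩ := PySem.List.getElem_of_index?_eq_some hk
  have hklt' : k < pvAllTerms.length := by simpa using hklt
  rw [List.getElem_map] at hkeq
  have hgk : g pvAllTerms[k] = m ∧ g pvAllTerms[k] ≠ -1 := by
    by_cases hgm : g pvAllTerms[k] = -1
    · rw [if_pos hgm] at hkeq; exact absurd hkeq (by simp)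
    · rw [if_neg hgm] at hkeq; exact ⟨by simpa using hkeq, hgm⟩
  refine ⟨pvAllTerms[k], List.getElem_mem _, ?_, hgk.1, ?_, ?_⟩
  · rw [hk, Option.getD_some, List.getElem?_eq_getElem hklt', Option.getD_some]
  · have h1 := hg pvAllTerms[k]
    have h2 := hgk.1
    have h3 := hgk.2
    omega
  · intro u hu
    by_cases hgu : g u = -1
    · exact Or.inl hgu
    · refine Or.inr (hisMin (g u) ?_)
      rw [List.mem_filterMap]
      exact ⟨some (g u), List.mem_map.2 ⟨u, hu, by rw [if_neg hgu]⟩, rfl⟩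

theorem prefix_of_append_le {α : Type} {u a b : List α} (h : u <+: a ++ b)
    (hl : u.length ≤ a.length) : u <+: a := by
  rw [List.prefix_iff_eq_take] at h ⊢
  exact h.trans (List.take_append_of_le_length hl)

-- per-row equivalence
theorem pvRow_eq (row : String)
    (h : pvAllTerms.any (fun t => PySem.Str.isIn t row) = true) :
    pvRowA row = pvRowB row := by
  obtain ⟨t0, ht0, hin0⟩ := List.any_eq_true.1 h
  have hinf0 : t0.toList <:+: row.toList := (PySem.Str.isIn_iff_infix _ _).1 hin0
  set cs := row.toList with hcs
  have hA : pvRowA row =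
      (match PySem.List.min? ((pvAllTerms.map (fun st => if PySem.Chars.find cs st.toList = -1 then (none : Option Int) else some (PySem.Chars.find cs st.toList))).filterMap id) (fun x => x) with
       | none => (0 : Int)
       | some m => pvTermDigit ((pvAllTerms[(PySem.List.index? (pvAllTerms.map (fun st => if PySem.Chars.find cs st.toList = -1 then (none : Option Int) else some (PySem.Chars.find cs st.toList))) (some m)).getD 0]?).getD "")) * 10
      + (match PySem.List.min? ((pvAllTerms.map (fun st => if PySem.Chars.find cs.reverse st.toList.reverse = -1 then (none : Option Int) else some (PySem.Chars.find cs.reverse st.toList.reverse))).filterMap id) (fun x => x) with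
       | none => (0 : Int)
       | some m => pvTermDigit ((pvAllTerms[(PySem.List.index? (pvAllTerms.map (fun st => if PySem.Chars.find cs.reverse st.toList.reverse = -1 then (none : Option Int) else some (PySem.Chars.find cs.reverse st.toList.reverse))) (some m)).getD 0]?).getD "")) := by
    simp only [pvRowA, searchTerms_eq, PySem.Str.find_eq, PySem.Str.slice?_none_none_neg_one,
      Option.getD_some, String.toList_ofList, List.map_map, Function.comp_def, hcs]
  -- the first search succeeds
  have hne1 : PySem.List.min? ((pvAllTerms.map (fun st => if PySem.Chars.find cs st.toList = -1 then (none : Option Int) else some (PySem.Chars.find cs st.toList))).filterMap id) (fun x => x) ≠ none := by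
    rw [Ne, PySem.List.min?_eq_none_iff]
    intro hnil
    have h0 : 0 ≤ PySem.Chars.find cs t0.toList := (PySem.Chars.find_nonneg_iff _ _).2 hinf0
    have : PySem.Chars.find cs t0.toList ∈ ((pvAllTerms.map (fun st => if PySem.Chars.find cs st.toList = -1 then (none : Option Int) else some (PySem.Chars.find cs st.toList))).filterMap id) := by
      rw [List.mem_filterMap]
      exact ⟨some (PySem.Chars.find cs t0.toList),
        List.mem_map.2 ⟨t0, ht0, by rw [if_neg (by omega)]⟩, rfl⟩
    rw [hnil] at this
    simp at this
  obtain ⟨m₁, hm₁⟩ := Option.ne_none_iff_exists'.1 hne1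
  -- the reversed search succeeds
  have hinf0r : t0.toList.reverse <:+: cs.reverse := List.reverse_infix.2 hinf0
  have hne2 : PySem.List.min? ((pvAllTerms.map (fun st => if PySem.Chars.find cs.reverse st.toList.reverse = -1 then (none : Option Int) else some (PySem.Chars.find cs.reverse st.toList.reverse))).filterMap id) (fun x => x) ≠ none := by
    rw [Ne, PySem.List.min?_eq_none_iff]
    intro hnil
    have h0 : 0 ≤ PySem.Chars.find cs.reverse t0.toList.reverse := (PySem.Chars.find_nonneg_iff _ _).2 hinf0r
    have : PySem.Chars.find cs.reverse t0.toList.reverse ∈ ((pvAllTerms.map (fun st => if PySem.Chars.find cs.reverse st.toList.reverse = -1 then (none : Option Int) else some (PySem.Chars.find cs.reverse st.toList.reverse))).filterMap id) := by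
      rw [List.mem_filterMap]
      exact ⟨some (PySem.Chars.find cs.reverse t0.toList.reverse),
        List.mem_map.2 ⟨t0, ht0, by rw [if_neg (by omega)]⟩, rfl⟩
    rw [hnil] at this
    simp at this
  obtain ⟨m₂, hm₂⟩ := Option.ne_none_iff_exists'.1 hne2
  -- apply the selection lemma to both searches
  obtain ⟨t1, ht1, hsel1, hgt1, h1pos, hmin1⟩ :=
    select_spec (fun st => PySem.Chars.find cs st.toList)
      (fun t => PySem.Chars.neg_one_le_find _ _) m₁ hm₁
  obtain ⟨t2, ht2, hsel2, hgt2, h2pos, hmin2⟩ :=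
    select_spec (fun st => PySem.Chars.find cs.reverse st.toList.reverse)
      (fun t => PySem.Chars.neg_one_le_find _ _) m₂ hm₂
  rw [hm₁, hm₂] at hA
  simp only [hsel1, hsel2] at hA
  -- ===== first digit: B's head is the value at position m₁ =====
  obtain ⟨hp1, hnb1⟩ := PySem.Chars.find_spec (show 0 ≤ PySem.Chars.find cs t1.toList by omega)
  rw [hgt1] at hp1 hnb1
  have hph1 : (pvPos (cs.drop m₁.toNat)).head? = some (pvTermDigit t1) :=
    pos_head_of_match _ t1 ht1 hp1
  have hhead : (pvScanB cs).head? = some (pvTermDigit t1) := by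
    rw [scan_head cs m₁.toNat ?hne ?hmin]
    · exact hph1
    case hne =>
      intro hnil
      rw [hnil] at hph1
      simp at hph1
    case hmin =>
      intro j hj
      by_contra hne'
      obtain ⟨u, hu, hup⟩ := match_of_pos_ne_nil _ hne'
      have hle := find_le_of_prefix cs u.toList j hup
      have hinfu : u.toList <:+: cs := hup.isInfix.trans (List.drop_suffix j cs).isInfix
      have h0u : 0 ≤ PySem.Chars.find cs u.toList := (PySem.Chars.find_nonneg_iff _ _).2 hinfu
      have hmu := hmin1 u hu
      simp only [] at hmu
      rcases hmu with hmu | hmu <;> omega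
  -- ===== last digit: B's last value is the value ending at cs.length - m₂ =====
  obtain ⟨hp2, hnb2⟩ := PySem.Chars.find_spec (show 0 ≤ PySem.Chars.find cs.reverse t2.toList.reverse by omega)
  rw [hgt2] at hp2 hnb2
  have hj0le : m₂.toNat ≤ cs.length := by
    have := PySem.Chars.find_le_length cs.reverse t2.toList.reverse
    rw [hgt2, List.length_reverse] at this
    omega
  have hsfx : t2.toList <:+ cs.take (cs.length - m₂.toNat) := by
    rw [List.drop_reverse] at hp2
    exact List.reverse_prefix.1 hp2
  obtain ⟨pre, hpre⟩ := hsfx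
  have hcs_split : cs = pre ++ (t2.toList ++ cs.drop (cs.length - m₂.toNat)) := by
    conv_lhs => rw [← List.take_append_drop (cs.length - m₂.toNat) cs]
    rw [← hpre, List.append_assoc]
  have hetot : cs.length - m₂.toNat = pre.length + t2.toList.length := by
    have h1 : (cs.take (cs.length - m₂.toNat)).length = cs.length - m₂.toNat := by
      rw [List.length_take]
      omega
    rw [← hpre, List.length_append] at h1
    omega
  have hp2' : t2.toList <+: cs.drop pre.length := by
    rw [hcs_split, List.drop_left]
    exact List.prefix_append _ _
  have hph2 : (pvPos (cs.drop pre.length)).head? = some (pvTermDigit t2) :=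
    pos_head_of_match _ t2 ht2 hp2'
  have hlast : (pvScanB cs).getLast? = some (pvTermDigit t2) := by
    rw [scan_last cs pre.length ?hne2 ?hmax]
    · exact hph2
    case hne2 =>
      intro hnil
      rw [hnil] at hph2
      simp at hph2
    case hmax =>
      intro j hj
      by_contra hne'
      obtain ⟨u, hu, hup⟩ := match_of_pos_ne_nil _ hne'
      have hunil := terms_ne_nil u hu
      have hupos : 0 < u.toList.length := List.length_pos_of_ne_nil hunil
      have hjlt : j < cs.length := by
        by_contra hge
        rw [List.drop_eq_nil_iff.2 (by omega)] at hup
        exact hunil (List.prefix_nil.1 hup)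
      have hulen : u.toList.length ≤ cs.length - j := by
        have := hup.length_le
        rw [List.length_drop] at this
        omega
      have htake : (cs.drop j).take u.toList.length = u.toList :=
        (List.prefix_iff_eq_take.1 hup).symm
      have hsfx' : u.toList <:+ cs.take (j + u.toList.length) := by
        rw [List.take_add]
        exact ⟨cs.take j, by rw [htake]⟩
      have hrevp : u.toList.reverse <+: (cs.reverse).drop (cs.length - (j + u.toList.length)) := by
        rw [List.drop_reverse]
        have heq : cs.length - (cs.length - (j + u.toList.length)) = j + u.toList.length := by
          omega
        rw [heq]
        exact List.reverse_prefix.2 hsfx'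
      have hle := find_le_of_prefix cs.reverse u.toList.reverse _ hrevp
      have hinfu : u.toList.reverse <:+: cs.reverse :=
        hrevp.isInfix.trans (List.drop_suffix _ _).isInfix
      have h0u : 0 ≤ PySem.Chars.find cs.reverse u.toList.reverse :=
        (PySem.Chars.find_nonneg_iff _ _).2 hinfu
      have hmu := hmin2 u hu
      beta_reduce at hmu
      have hje : j + u.toList.length ≤ cs.length - m₂.toNat := by
        rcases hmu with hmu | hmu <;> omega
      -- u's occurrence lies inside t2's occurrence, so u is an infix of t2
      have hd : cs.drop j = t2.toList.drop (j - pre.length) ++ cs.drop (cs.length - m₂.toNat) := by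
        conv_lhs => rw [hcs_split]
        rw [List.drop_append, List.drop_eq_nil_iff.2 (by omega), List.nil_append,
          List.drop_append_of_le_length (by omega)]
      have hup' : u.toList <+: t2.toList.drop (j - pre.length) := by
        refine prefix_of_append_le (hd ▸ hup) ?_
        rw [List.length_drop]
        omega
      have hinfixut : u.toList <:+: t2.toList :=
        hup'.isInfix.trans (List.drop_suffix _ _).isInfix
      have huet := terms_infix u hu t2 ht2 hinfixut
      have hlen : u.toList.length = t2.toList.length := by rw [huet]
      omega
  -- ===== assemble =====
  have hB : pvRowB row = pvTermDigit t1 * 10 + pvTermDigit t2 := by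
    show ((pvScanB row.toList).head?.getD 0) * 10 + ((pvScanB row.toList).getLast?.getD 0)
      = pvTermDigit t1 * 10 + pvTermDigit t2
    rw [← hcs, hhead, hlast]
    rfl
  rw [hA, hB]

theorem fold_rows (rows : List String)
    (h : ∀ r ∈ rows, pvAllTerms.any (fun t => PySem.Str.isIn t r) = true) :
    ∀ (acc : Int),
      rows.foldl (fun a r => a + pvRowA r) acc = rows.foldl (fun a r => a + pvRowB r) acc := by
  induction rows with
  | nil => intro acc; rfl
  | cons r rs ih =>
      intro acc
      simp only [List.foldl_cons]
      rw [pvRow_eq r (h r (by simp))]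
      exact ih (fun x hx => h x (by simp [hx])) _

-- ===== VERDICT (by name: the statement is the Claim_ definition above) =====
theorem solve_part_b_spec : Claim_equal_solve_part_b := by
  intro s _ hpre
  unfold Spec_solve_part_b solve_part_b solve_part_b_alt
  unfold Pre_solve_part_b at hpre
  rw [List.all_eq_true] at hpre
  exact fold_rows _ hpre 0
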